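-- pv_equiv track=rewrite | github.com/ayaanhossain/weldor | weldor/weldor.py | get_covers
-- ===== SOURCE A (Python) =====
-- def get_cover_score(word, coverage):
--     '''
--     Return the cover score of a word
--     for a given coverage dictionary
--     '''
--     score = 0
--     for c in set(word):
--         if c in coverage:
--             score += coverage[c]
--     return score
--
-- def get_covers(source, index, coverage):
--     '''
--     Get cover words from source that
--     maximize the differential coverage
--     according to coverage dictionary.
--
--     :: source
--        type - generator
--        desc - a stream of source words
--               to evaluate for cover
--      :: index
--        type - list
--        desc - a list of allowed words
--     :: coverage
--        type - dictionary
--        desc - a dictionary of letters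
--               and their differential
--               coverage count / score
--     '''
--
--     # Define variables
--     cover_score = 0
--     cover_words = []
--
--     # Evaluation loop
--     for j in source:
--
--         # Fetch word
--         word = index[j]
--
--         # Compute the current coverage score
--         # of a word from the source stream
--         current_score = get_cover_score(
--             word=word,
--             coverage=coverage)
--
--         # Is it better than anything before?
--         if current_score > cover_score:
--             # Update records
--             cover_score = current_score
--             cover_words = [j]
--
--         # Equally good as current best!
--         elif current_score == cover_score:
--             # Retain if we have less than
--             # 5 words for coverage
--             if len(cover_words) < 5:
--                 cover_words.append(j)
--
--     # Return result
--     return cover_words, cover_score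
-- ===== SOURCE B (Python) =====
-- def get_cover_score(word, coverage):
--     score = 0
--     for c in set(word):
--         if c in coverage:
--             score += coverage[c]
--     return score
--
-- def get_covers(source, index, coverage):
--     # Score table + separate max-and-filter pass (instead of fused running max)
--     idxs = list(source)
--     scores = [get_cover_score(index[j], coverage) for j in idxs]
--     best = max(0, max(scores, default=0))
--     cover_words = [j for j, s in zip(idxs, scores) if s == best][:5]
--     return cover_words, best
-- ===== Notes on version B (the rewrite author's own statement) =====
-- stated objective: alternative
-- what changed: Replaces the fused single-pass running-max-with-tie-retention loop by an explicit score table, a clamped max (max(0, max(scores, default=0))), and a separate filter pass taking the first five indices whose score equals the max.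
import Mathlib
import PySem

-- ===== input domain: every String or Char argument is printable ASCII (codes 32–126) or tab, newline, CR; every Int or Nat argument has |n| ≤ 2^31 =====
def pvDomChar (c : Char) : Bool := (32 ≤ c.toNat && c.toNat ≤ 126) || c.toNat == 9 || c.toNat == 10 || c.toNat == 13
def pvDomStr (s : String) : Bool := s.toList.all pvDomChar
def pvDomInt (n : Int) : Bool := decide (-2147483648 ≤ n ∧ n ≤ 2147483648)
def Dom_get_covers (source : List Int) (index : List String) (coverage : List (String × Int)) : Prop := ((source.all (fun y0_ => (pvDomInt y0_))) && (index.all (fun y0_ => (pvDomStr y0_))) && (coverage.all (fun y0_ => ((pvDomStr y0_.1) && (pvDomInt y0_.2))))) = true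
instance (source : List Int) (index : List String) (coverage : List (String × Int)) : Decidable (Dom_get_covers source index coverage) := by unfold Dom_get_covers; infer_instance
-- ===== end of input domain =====

-- B replaces A's fused running-max/tie-retention loop by a score table plus a
-- separate max-and-filter pass (alternative decomposition, same cost).

-- ===== PORT A =====
-- shared module helper: get_cover_score (identical in Source A and Source B);
-- set(word) → PySem.Set.ofList; 'c in coverage' / coverage[c] → first-match assoc lookup
def cover_score (word : String) (coverage : List (String × Int)) : Int :=
  (PySem.Set.ofList word.toList).foldl
    (fun score c =>
      match coverage.lookup (String.ofList [c]) with
      | some v => score + v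
      | none => score) 0

def get_covers (source : List Int) (index : List String) (coverage : List (String × Int)) : List Int × Int :=
  -- state (cover_words, cover_score); index[j] is total under Pre_ (in range)
  source.foldl
    (fun st j =>
      let word := PySem.List.pyGetD index j ""
      let current_score := cover_score word coverage
      if current_score > st.2 then ([j], current_score)
      else if current_score == st.2 then
        (if st.1.length < 5 then (st.1 ++ [j], st.2) else st)
      else st)
    ([], 0)

-- ===== PORT B =====
def get_covers_alt (source : List Int) (index : List String) (coverage : List (String × Int)) : List Int × Int :=
  let scores := source.map (fun j => cover_score (PySem.List.pyGetD index j "") coverage)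
  let best := max 0 ((PySem.List.max? scores (fun y => y)).getD 0)
  ((((source.zip scores).filter (fun p => p.2 == best)).map (fun p => p.1)).take 5, best)

-- ===== PRECONDITION & SPEC =====
-- Pre_ excludes exactly the inputs where Python's index[j] raises IndexError (j out of range).
def Pre_get_covers (source : List Int) (index : List String) (coverage : List (String × Int)) : Prop :=
  ∀ j ∈ source, PySem.Raise.InRange index.length j
instance (source : List Int) (index : List String) (coverage : List (String × Int)) : Decidable (Pre_get_covers source index coverage) := by unfold Pre_get_covers; infer_instance
def pvWitness_get_covers : List Int × List String × (List (String × Int)) := ([0, 1, -1], ["ab", "cd"], [("a", 2), ("c", 2)])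

def Spec_get_covers (source : List Int) (index : List String) (coverage : List (String × Int)) (out : List Int × Int) : Prop := out = get_covers_alt source index coverage
instance (source : List Int) (index : List String) (coverage : List (String × Int)) (out : List Int × Int) : Decidable (Spec_get_covers source index coverage out) := by unfold Spec_get_covers; infer_instance

-- ===== CLAIM (what is proved, stated in full; the proofs are below) =====
def Claim_equal_get_covers : Prop := ∀ (source : List Int) (index : List String) (coverage : List (String × Int)), Dom_get_covers source index coverage → Pre_get_covers source index coverage → Spec_get_covers source index coverage (get_covers source index coverage)

-- ===== LEMMAS AND PROOFS =====

-- running max over a projection, as computed by A's second component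
def runMax (f : Int → Int) (l : List Int) : Int :=
  l.foldl (fun a j => max a (f j)) 0

lemma runMax_append (f : Int → Int) (l : List Int) (j : Int) :
    runMax f (l ++ [j]) = max (runMax f l) (f j) := by
  simp [runMax, List.foldl_append]

lemma le_runMax (f : Int → Int) (l : List Int) : ∀ x ∈ l, f x ≤ runMax f l :=
  (PySem.List.le_foldl_max_int l f 0).2

-- A's loop invariant, for a generic score function f:
-- after a prefix l the state is (first five f-maximisers of l, running max clamped at 0)
lemma loopA_inv (f : Int → Int) (l : List Int) :
    (l.foldl
      (fun st j =>
        if f j > st.2 then ([j], f j)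
        else if f j == st.2 then
          (if st.1.length < 5 then (st.1 ++ [j], st.2) else st)
        else st)
      ([], 0))
    = ((l.filter (fun j => f j == runMax f l)).take 5, runMax f l) := by
  induction l using List.reverseRecOn with
  | nil => simp [runMax]
  | append_singleton l j ih =>
    rw [List.foldl_append, ih, runMax_append]
    simp only [List.foldl_cons, List.foldl_nil]
    by_cases h1 : f j > runMax f l
    · have hmax : max (runMax f l) (f j) = f j := by omega
      have hfl : l.filter (fun x => f x == f j) = [] := by
        rw [List.filter_eq_nil_iff]
        intro x hx
        have := le_runMax f l x hx
        simp only [beq_iff_eq]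
        omega
      rw [hmax]
      simp only [if_pos h1, List.filter_append, hfl]
      simp
    · have hmax : max (runMax f l) (f j) = runMax f l := by omega
      rw [hmax]
      simp only [if_neg h1]
      by_cases h2 : f j == runMax f l
      · simp only [if_pos h2]
        have h2' : f j = runMax f l := by simpa using h2
        have hfl : (l ++ [j]).filter (fun x => f x == runMax f l)
            = l.filter (fun x => f x == runMax f l) ++ [j] := by
          rw [List.filter_append]; simp [h2']
        rw [hfl]
        by_cases h3 : (List.take 5 (l.filter (fun x => f x == runMax f l))).length < 5
        · have hlen : (l.filter (fun x => f x == runMax f l)).length < 5 := by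
            simpa [List.length_take] using h3
          rw [if_pos h3,
            List.take_of_length_le (by omega : (l.filter (fun x => f x == runMax f l)).length ≤ 5),
            List.take_of_length_le (by simp; omega)]
        · have hlen : 5 ≤ (l.filter (fun x => f x == runMax f l)).length := by
            simp [List.length_take] at h3; omega
          rw [if_neg h3, List.take_append_of_le_length hlen]
      · simp only [if_neg h2]
        have hfl : (l ++ [j]).filter (fun x => f x == runMax f l)
            = l.filter (fun x => f x == runMax f l) := by
          rw [List.filter_append]; simp; simpa using h2
        rw [hfl]

lemma max_foldl_max (t : List Int) : ∀ a b : Int, max a (t.foldl max b) = t.foldl max (max a b) := by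
  induction t with
  | nil => intro a b; simp
  | cons c t ih =>
    intro a b
    simp only [List.foldl_cons]
    rw [ih a (max b c), max_assoc]

-- B's best equals the running max
lemma best_eq_runMax (f : Int → Int) (l : List Int) :
    max 0 ((PySem.List.max? (l.map f) (fun y => y)).getD 0) = runMax f l := by
  cases l with
  | nil => simp [runMax, PySem.List.max?]
  | cons x t =>
    simp only [List.map_cons]
    rw [PySem.List.max?_id_cons]
    simp only [Option.getD_some]
    rw [max_foldl_max, runMax]
    simp [List.foldl_map]

-- B's zip-filter-map over the score table equals a direct filter
lemma zip_filter_map (f : Int → Int) (b : Int) (l : List Int) :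
    (((l.zip (l.map f)).filter (fun p => p.2 == b)).map (fun p => p.1))
    = l.filter (fun j => f j == b) := by
  induction l with
  | nil => simp
  | cons x t ih =>
    simp only [List.map_cons, List.zip_cons_cons, List.filter_cons]
    by_cases h : f x == b
    · simp only [h]
      simp [ih]
    · simp [h, ih]

-- B's whole body, for a generic score function, rewritten to the invariant's normal form
lemma altB (f : Int → Int) (l : List Int) :
    ((((l.zip (l.map f)).filter
        (fun p => p.2 == max 0 ((PySem.List.max? (l.map f) (fun y => y)).getD 0))).map
        (fun p => p.1)).take 5,
      max 0 ((PySem.List.max? (l.map f) (fun y => y)).getD 0))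
    = ((l.filter (fun j => f j == runMax f l)).take 5, runMax f l) := by
  rw [best_eq_runMax, zip_filter_map]

-- ===== VERDICT (by name: the statement is the Claim_ definition above) =====
theorem get_covers_spec : Claim_equal_get_covers := by
  intro source index coverage _hdom _hpre
  exact (loopA_inv (fun j => cover_score (PySem.List.pyGetD index j "") coverage) source).trans
    (altB (fun j => cover_score (PySem.List.pyGetD index j "") coverage) source).symm
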